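-- pv_equiv track=rewrite | github.com/Matisse-Consortium/p2obt | p2obp/backend/parse.py | get_file_section
-- ===== SOURCE A (Python) =====
-- from typing import Dict, List, Optional
--
-- def get_file_section(lines: List, identifier: str) -> Dict:
--     """Gets the section of a file corresponding to the given identifier and
--     returns a dict with the keys being the match to the identifier and the
--     values being a subset of the lines list.
--
--     Parameters
--     ----------
--     lines : list
--         The lines read from a file.
--     identifier : str
--         The identifier by which they should be split into subsets.
--
--     Returns
--     --------
--     subset : dict
--         A dict that contains a subsets of the original lines.
--     """
--     indices, labels = [], []
--     for index, line in enumerate(lines):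
--         if line.lower().startswith(identifier):
--             indices.append(index)
--             labels.append(line.strip())
--
--     if not indices:
--         indices, labels = [0], ["full_" + identifier]
--
--     sections = [lines[index:] if index == indices[~0] else
--                 lines[index:indices[i+1]] for i, index in enumerate(indices)]
--     return dict(zip(labels, sections))
-- ===== SOURCE B (Python) =====
-- def get_file_section(lines, identifier):
--     """Single pass: open a new section at each matching line, append other
--     lines to the currently open section; fall back to the whole list."""
--     sections = {}
--     current = None
--     for line in lines:
--         if line.lower().startswith(identifier):
--             current = line.strip()
--             sections[current] = [line]
--         elif current is not None:
--             sections[current].append(line)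
--     if current is None:
--         return {"full_" + identifier: lines}
--     return sections
-- ===== Notes on version B (the rewrite author's own statement) =====
-- stated objective: simpler
-- what changed: Replaces the index-collect-then-slice structure (enumerate to gather match indices, then build sections by slicing between consecutive indices and zip into a dict) with one incremental pass that opens a new list at each matching line and appends following lines to the currently open section.
import Mathlib
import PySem

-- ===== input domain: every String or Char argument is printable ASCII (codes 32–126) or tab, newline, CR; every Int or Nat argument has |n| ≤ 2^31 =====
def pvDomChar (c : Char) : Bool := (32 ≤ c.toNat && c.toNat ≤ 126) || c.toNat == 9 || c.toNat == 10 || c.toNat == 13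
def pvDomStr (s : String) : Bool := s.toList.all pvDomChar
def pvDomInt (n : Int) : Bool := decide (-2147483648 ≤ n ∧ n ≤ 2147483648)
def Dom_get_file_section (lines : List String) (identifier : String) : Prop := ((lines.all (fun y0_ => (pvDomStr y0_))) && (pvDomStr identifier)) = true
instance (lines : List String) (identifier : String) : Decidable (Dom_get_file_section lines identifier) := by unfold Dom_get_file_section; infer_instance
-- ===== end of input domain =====

-- B replaces A's collect-match-indices-then-slice-between-indices structure by a single
-- incremental pass that opens a new section at each matching line and appends the other
-- lines to the currently open one (objective: a simpler decomposition, same return value).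

-- ===== PORT A =====
-- line.lower().startswith(identifier)  (both Pythons compute this expression verbatim)
def pvMatch (identifier line : String) : Bool :=
  PySem.Str.startswith (PySem.Str.lower line) identifier

-- "full_" + identifier  (string concatenation done on the char-list side; both Pythons build it)
def pvFullKey (identifier : String) : String :=
  String.ofList ("full_".toList ++ identifier.toList)

-- the body of A's first loop: record (index, line.strip()) for each matching line
def pvStepA (identifier : String) (acc : List Int × List String) (p : Int × String) :
    List Int × List String :=
  if pvMatch identifier p.2 then (acc.1 ++ [p.1], acc.2 ++ [PySem.Str.strip p.2]) else acc

-- A's sections comprehension; `ind` (Python's `indices`) is nonempty whenever this is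
-- evaluated, so indices[~0] and indices[i+1] never raise and pyGetD's default 0 is unreachable
def pvSecs (lines : List String) (ind : List Int) : List (List String) :=
  (PySem.List.enumerate ind 0).map (fun p =>
    if p.2 = PySem.List.pyGetD ind (-1) 0 then PySem.List.slice lines (some p.2) none
    else PySem.List.slice lines (some p.2) (some (PySem.List.pyGetD ind (p.1 + 1) 0)))

def get_file_section (lines : List String) (identifier : String) : List (String × List String) :=
  let il := (PySem.List.enumerate lines 0).foldl (pvStepA identifier) ([], [])
  let il' := if il.1 = [] then ([(0 : Int)], [pvFullKey identifier]) else il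
  (PySem.Dict.ofList (il'.2.zip (pvSecs lines il'.1))).items

-- ===== PORT B =====
-- the body of B's loop: a matching line opens a fresh section keyed by its stripped text,
-- any other line is appended to the currently open section (if one is open)
def pvStepB (identifier : String) (st : PySem.Dict String (List String) × Option String)
    (line : String) : PySem.Dict String (List String) × Option String :=
  if pvMatch identifier line then
    (st.1.insert (PySem.Str.strip line) [line], some (PySem.Str.strip line))
  else
    match st.2 with
    | some k => (st.1.modify k [] (fun v => v ++ [line]), some k)
    | none => st

def get_file_section_alt (lines : List String) (identifier : String) :
    List (String × List String) :=
  let st := lines.foldl (pvStepB identifier) (PySem.Dict.empty, none)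
  match st.2 with
  | none => [(pvFullKey identifier, lines)]
  | some _ => st.1.items

-- ===== PRECONDITION & SPEC =====
def Spec_get_file_section (lines : List String) (identifier : String) (out : List (String × List String)) : Prop := out = get_file_section_alt lines identifier
instance (lines : List String) (identifier : String) (out : List (String × List String)) : Decidable (Spec_get_file_section lines identifier out) := by unfold Spec_get_file_section; infer_instance

-- ===== CLAIM (what is proved, stated in full; the proofs are below) =====
def Claim_equal_get_file_section : Prop := ∀ (lines : List String) (identifier : String), Dom_get_file_section lines identifier → Spec_get_file_section lines identifier (get_file_section lines identifier)

-- ===== LEMMAS AND PROOFS =====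

lemma slice_append_inner (lines : List String) (x : String) (a b : Int)
    (ha : 0 ≤ a) (hab : a ≤ b) (hb : b ≤ (lines.length : Int)) :
    PySem.List.slice (lines ++ [x]) (some a) (some b) = PySem.List.slice lines (some a) (some b) := by
  rw [PySem.List.slice_toNat _ ha (by omega), PySem.List.slice_toNat _ ha (by omega)]
  rw [List.drop_append_of_le_length (by omega)]
  rw [List.take_append_of_le_length (by simp only [List.length_drop]; omega)]

lemma slice_append_to_len (lines : List String) (x : String) (a : Int) (ha : 0 ≤ a)
    (hb : a ≤ (lines.length : Int)) :
    PySem.List.slice (lines ++ [x]) (some a) (some (lines.length : Int)) =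
      PySem.List.slice lines (some a) none := by
  rw [PySem.List.slice_toNat _ ha (by omega), PySem.List.slice_from _ ha]
  rw [List.drop_append_of_le_length (by omega)]
  rw [List.take_append_of_le_length (by simp only [List.length_drop]; omega)]
  apply List.take_of_length_le
  simp only [List.length_drop]; omega

lemma slice_append_from_len (lines : List String) (x : String) :
    PySem.List.slice (lines ++ [x]) (some (lines.length : Int)) none = [x] := by
  rw [PySem.List.slice_from _ (by positivity)]
  simp

lemma pyGetD_append_last (ind : List Int) (n : Int) (k : Nat) (hk : k + 1 = ind.length) :
    PySem.List.pyGetD (ind ++ [n]) ((k : Int) + 1) 0 = n := by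
  have : ((k : Int) + 1) = ((k + 1 : Nat) : Int) := by push_cast; ring
  rw [this, PySem.List.pyGetD_natCast, List.getD_eq_getElem?_getD,
    List.getElem?_append_right (by omega)]
  simp [hk]

lemma pyGetD_append_inner (ind : List Int) (n : Int) (k : Nat) (hk : k + 1 < ind.length) :
    PySem.List.pyGetD (ind ++ [n]) ((k : Int) + 1) 0 =
      PySem.List.pyGetD ind ((k : Int) + 1) 0 := by
  have : ((k : Int) + 1) = ((k + 1 : Nat) : Int) := by push_cast; ring
  rw [this, PySem.List.pyGetD_natCast, PySem.List.pyGetD_natCast,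
    List.getD_eq_getElem?_getD, List.getD_eq_getElem?_getD, List.getElem?_append_left (by omega)]

lemma pvSecs_append_match (lines : List String) (x : String) (ind : List Int)
    (hbound : ∀ j ∈ ind, 0 ≤ j ∧ j < (lines.length : Int)) (hpw : ind.Pairwise (· < ·)) :
    pvSecs (lines ++ [x]) (ind ++ [(lines.length : Int)]) = pvSecs lines ind ++ [[x]] := by
  unfold pvSecs
  rw [PySem.List.enumerate_append, List.map_append]
  congr 1
  · -- inner part
    apply List.map_congr_left
    intro p hp
    obtain ⟨k, hk, rfl⟩ := (PySem.List.mem_enumerate_iff ind 0 p).1 hp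
    simp only [zero_add]
    have hmem : ind[k] ∈ ind := List.getElem_mem hk
    have hlt : ind[k] < (lines.length : Int) := (hbound _ hmem).2
    have hge : 0 ≤ ind[k] := (hbound _ hmem).1
    have hne : ind ≠ [] := by intro h; simp [h] at hk
    have hlast : PySem.List.pyGetD (ind ++ [(lines.length : Int)]) (-1) 0 = (lines.length : Int) := by
      rw [PySem.List.pyGetD_neg_one _ _ (by simp)]
      exact List.getLast_concat
    rw [hlast]
    rw [if_neg (show ¬ (ind[k] = (lines.length : Int)) by omega)]
    rw [PySem.List.pyGetD_neg_one _ _ hne]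
    have hlastel : ind.getLast hne = ind[ind.length - 1] := List.getLast_eq_getElem hne
    by_cases hk1 : k + 1 = ind.length
    · -- last element of ind
      rw [if_pos (by rw [hlastel]; congr 1; omega)]
      rw [pyGetD_append_last _ _ _ hk1]
      exact slice_append_to_len _ _ _ hge (by omega)
    · have hk1' : k + 1 < ind.length := by omega
      have hlt2 : ind[k] < ind[ind.length - 1] :=
        List.pairwise_iff_getElem.1 hpw _ _ hk (by omega) (by omega)
      rw [if_neg (by rw [hlastel]; omega)]
      rw [pyGetD_append_inner _ _ _ hk1']
      have : ((k : Int) + 1) = ((k + 1 : Nat) : Int) := by push_cast; ring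
      rw [this, PySem.List.pyGetD_natCast, List.getD_eq_getElem _ 0 (by omega)]
      have hkk1 : ind[k] < ind[k+1] := List.pairwise_iff_getElem.1 hpw _ _ hk hk1' (by omega)
      have hbk1 : ind[k+1] < (lines.length : Int) := (hbound _ (List.getElem_mem hk1')).2
      exact slice_append_inner _ _ _ _ hge (by omega) (by omega)
  · -- new last section
    have hlast : PySem.List.pyGetD (ind ++ [(lines.length : Int)]) (-1) 0 = (lines.length : Int) := by
      rw [PySem.List.pyGetD_neg_one _ _ (by simp)]
      exact List.getLast_concat
    simp only [PySem.List.enumerate_cons, PySem.List.enumerate_nil, List.map_cons, List.map_nil,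
      hlast, if_pos]
    rw [slice_append_from_len]

lemma slice_append_open (lines : List String) (x : String) (a : Int) (ha : 0 ≤ a)
    (hb : a ≤ (lines.length : Int)) :
    PySem.List.slice (lines ++ [x]) (some a) none =
      PySem.List.slice lines (some a) none ++ [x] := by
  rw [PySem.List.slice_from _ ha, PySem.List.slice_from _ ha]
  rw [List.drop_append_of_le_length (by omega)]

lemma pvSecs_split (lines : List String) (is : List Int) (i0 : Int)
    (hpw : (is ++ [i0]).Pairwise (· < ·)) :
    pvSecs lines (is ++ [i0]) =
      (PySem.List.enumerate is 0).map (fun p =>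
        PySem.List.slice lines (some p.2)
          (some (PySem.List.pyGetD (is ++ [i0]) (p.1 + 1) 0))) ++
      [PySem.List.slice lines (some i0) none] := by
  unfold pvSecs
  rw [PySem.List.enumerate_append, List.map_append]
  have hlast : PySem.List.pyGetD (is ++ [i0]) (-1) 0 = i0 := by
    rw [PySem.List.pyGetD_neg_one _ _ (by simp)]
    exact List.getLast_concat
  congr 1
  · apply List.map_congr_left
    intro p hp
    obtain ⟨k, hk, rfl⟩ := (PySem.List.mem_enumerate_iff is 0 p).1 hp
    simp only [zero_add]
    have hlt : is[k] < i0 := by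
      have := List.pairwise_iff_getElem.1 hpw k is.length (by simp; omega) (by simp) (by omega)
      simpa [List.getElem_append, hk] using this
    rw [hlast, if_neg (by omega)]
  · simp only [PySem.List.enumerate_cons, PySem.List.enumerate_nil, List.map_cons, List.map_nil,
      hlast, if_pos]

lemma pvSecs_append_nonmatch (lines : List String) (x : String) (is : List Int) (i0 : Int)
    (hbound : ∀ j ∈ is ++ [i0], 0 ≤ j ∧ j < (lines.length : Int))
    (hpw : (is ++ [i0]).Pairwise (· < ·)) :
    pvSecs (lines ++ [x]) (is ++ [i0]) =
      (PySem.List.enumerate is 0).map (fun p =>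
        PySem.List.slice lines (some p.2)
          (some (PySem.List.pyGetD (is ++ [i0]) (p.1 + 1) 0))) ++
      [PySem.List.slice lines (some i0) none ++ [x]] := by
  rw [pvSecs_split _ _ _ hpw]
  congr 1
  · apply List.map_congr_left
    intro p hp
    obtain ⟨k, hk, rfl⟩ := (PySem.List.mem_enumerate_iff is 0 p).1 hp
    simp only [zero_add]
    have hgeK : 0 ≤ is[k] := (hbound _ (by simp [List.getElem_mem hk])).1
    by_cases hk1 : k + 1 = is.length
    · rw [pyGetD_append_last _ _ _ hk1]
      have hi0 : 0 ≤ i0 ∧ i0 < (lines.length : Int) := hbound i0 (by simp)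
      have hlt : is[k] < i0 := by
        have := List.pairwise_iff_getElem.1 hpw k is.length (by simp; omega) (by simp) (by omega)
        simpa [List.getElem_append, hk] using this
      exact slice_append_inner _ _ _ _ hgeK (by omega) (by omega)
    · have hk1' : k + 1 < is.length := by omega
      rw [pyGetD_append_inner _ _ _ hk1']
      have hcast : ((k : Int) + 1) = ((k + 1 : Nat) : Int) := by push_cast; ring
      rw [hcast, PySem.List.pyGetD_natCast, List.getD_eq_getElem _ 0 (by omega)]
      have hkk1 : is[k] < is[k+1] := by
        have := List.pairwise_iff_getElem.1 hpw k (k+1) (by simp; omega) (by simp; omega) (by omega)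
        simpa [List.getElem_append, hk, hk1'] using this
      have hb : is[k+1] < (lines.length : Int) := (hbound _ (by simp [List.getElem_mem hk1'])).2
      exact slice_append_inner _ _ _ _ hgeK (by omega) (by omega)
  · rw [slice_append_open _ _ _ (hbound i0 (by simp)).1 (by have := (hbound i0 (by simp)).2; omega)]

lemma ofList_append_singleton {κ ν : Type} [BEq κ] (Z : List (κ × ν)) (k : κ) (v : ν) :
    PySem.Dict.ofList (Z ++ [(k, v)]) = (PySem.Dict.ofList Z).insert k v := by
  simp [PySem.Dict.ofList, PySem.Dict.update, List.foldl_append]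

lemma modify_ofList_last {κ ν : Type} [BEq κ] [LawfulBEq κ] (Z : List (κ × ν)) (k : κ) (v : ν)
    (d0 : ν) (f : ν → ν) :
    (PySem.Dict.ofList (Z ++ [(k, v)])).modify k d0 f = PySem.Dict.ofList (Z ++ [(k, f v)]) := by
  rw [ofList_append_singleton, ofList_append_singleton]
  show ((PySem.Dict.ofList Z).insert k v).insert k
    (f (((PySem.Dict.ofList Z).insert k v).getD k d0)) = _
  rw [PySem.Dict.getD_insert_self, PySem.Dict.insert_insert_self]

lemma length_pvSecs (lines : List String) (ind : List Int) :
    (pvSecs lines ind).length = ind.length := by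
  simp [pvSecs, PySem.List.length_enumerate]

lemma main_inv (identifier : String) (lines : List String) :
    (((PySem.List.enumerate lines 0).foldl (pvStepA identifier) ([], [])).1.length =
       ((PySem.List.enumerate lines 0).foldl (pvStepA identifier) ([], [])).2.length) ∧
    (∀ j ∈ ((PySem.List.enumerate lines 0).foldl (pvStepA identifier) ([], [])).1,
       0 ≤ j ∧ j < (lines.length : Int)) ∧
    (((PySem.List.enumerate lines 0).foldl (pvStepA identifier) ([], [])).1.Pairwise (· < ·)) ∧
    ((lines.foldl (pvStepB identifier) (PySem.Dict.empty, none)).1 =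
       PySem.Dict.ofList
         (((PySem.List.enumerate lines 0).foldl (pvStepA identifier) ([], [])).2.zip
           (pvSecs lines ((PySem.List.enumerate lines 0).foldl (pvStepA identifier) ([], [])).1))) ∧
    ((((PySem.List.enumerate lines 0).foldl (pvStepA identifier) ([], [])).1 = [] ∧
        (lines.foldl (pvStepB identifier) (PySem.Dict.empty, none)).2 = none) ∨
      (∃ ls l0, ((PySem.List.enumerate lines 0).foldl (pvStepA identifier) ([], [])).2 = ls ++ [l0] ∧
        (lines.foldl (pvStepB identifier) (PySem.Dict.empty, none)).2 = some l0)) := by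
  induction lines using List.reverseRecOn with
  | nil =>
    refine ⟨rfl, by simp [PySem.List.enumerate_nil], by simp [PySem.List.enumerate_nil], ?_, Or.inl ⟨rfl, rfl⟩⟩
    simp [PySem.List.enumerate_nil, pvSecs, PySem.Dict.ofList, PySem.Dict.update]
  | append_singleton ls x ih =>
    obtain ⟨i1, i2, i3, i4, i5⟩ := ih
    have eA : (PySem.List.enumerate (ls ++ [x]) 0).foldl (pvStepA identifier) ([], []) =
        pvStepA identifier ((PySem.List.enumerate ls 0).foldl (pvStepA identifier) ([], []))
          ((ls.length : Int), x) := by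
      rw [PySem.List.enumerate_append, List.foldl_append]
      simp [PySem.List.enumerate_cons, PySem.List.enumerate_nil]
    have eB : (ls ++ [x]).foldl (pvStepB identifier) (PySem.Dict.empty, none) =
        pvStepB identifier (ls.foldl (pvStepB identifier) (PySem.Dict.empty, none)) x := by
      rw [List.foldl_append]; rfl
    set il := (PySem.List.enumerate ls 0).foldl (pvStepA identifier) ([], []) with hil
    set st := ls.foldl (pvStepB identifier) (PySem.Dict.empty, none) with hst
    rw [eA, eB]
    have hlen1 : ((ls ++ [x]).length : Int) = (ls.length : Int) + 1 := by simp
    by_cases hm : pvMatch identifier x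
    · -- matching line appended
      simp only [pvStepA, pvStepB, hm, if_pos]
      refine ⟨by simp [i1], ?_, ?_, ?_, Or.inr ⟨il.2, PySem.Str.strip x, rfl, rfl⟩⟩
      · intro j hj
        rcases List.mem_append.1 hj with h | h
        · have := i2 j h; constructor <;> [exact this.1; omega]
        · simp at h; subst h; constructor <;> [positivity; omega]
      · rw [List.pairwise_append]
        refine ⟨i3, by simp, ?_⟩
        intro a ha b hb
        simp at hb; subst hb
        exact (i2 a ha).2
      · rw [i4, pvSecs_append_match ls x il.1 i2 i3,
          List.zip_append (by rw [length_pvSecs]; exact i1.symm), ← ofList_append_singleton]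
        simp
    · -- non-matching line appended
      simp only [pvStepA, pvStepB, hm, Bool.false_eq_true, ite_false]
      rcases i5 with ⟨hnil, hnone⟩ | ⟨ls0, l0, hl2, hsome⟩
      · have h2 : il.2 = [] := List.eq_nil_of_length_eq_zero (by rw [← i1, hnil]; rfl)
        rw [hnone]
        refine ⟨i1, ?_, i3, ?_, Or.inl ⟨hnil, hnone⟩⟩
        · intro j hj; have := i2 j hj; constructor <;> [exact this.1; omega]
        · rw [i4, hnil, h2]; simp
      · have hne : il.1 ≠ [] := by
          intro h; rw [hl2] at i1; rw [h] at i1; simp at i1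
        obtain ⟨is, i0, hl1⟩ : ∃ as a, il.1 = as ++ [a] :=
          ⟨il.1.dropLast, il.1.getLast hne, (List.dropLast_append_getLast hne).symm⟩
        have hbound : ∀ j ∈ is ++ [i0], 0 ≤ j ∧ j < (ls.length : Int) := hl1 ▸ i2
        have hpw : (is ++ [i0]).Pairwise (· < ·) := hl1 ▸ i3
        have hlis : ls0.length = is.length := by
          have := i1; rw [hl1, hl2] at this; simp at this; omega
        simp only [hsome]
        refine ⟨i1, ?_, i3, ?_, Or.inr ⟨ls0, l0, hl2, rfl⟩⟩
        · intro j hj; have := i2 j hj; constructor <;> [exact this.1; omega]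
        · rw [i4, hl1, hl2, pvSecs_split ls is i0 hpw, pvSecs_append_nonmatch ls x is i0 hbound hpw,
            List.zip_append (by simp [PySem.List.length_enumerate, hlis]),
            List.zip_append (by simp [PySem.List.length_enumerate, hlis])]
          simp only [List.zip_cons_cons, List.zip_nil_left]
          rw [modify_ofList_last]

lemma pvSecs_zero (lines : List String) : pvSecs lines [(0 : Int)] = [lines] := by
  unfold pvSecs
  rw [show PySem.List.pyGetD [(0:Int)] (-1) 0 = 0 from by decide]
  simp only [PySem.List.enumerate_cons, PySem.List.enumerate_nil, List.map_cons, List.map_nil]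
  rw [PySem.List.slice_zero_start, PySem.List.slice_none_none]
  simp

lemma items_ofList_singleton {κ ν : Type} [BEq κ] [LawfulBEq κ] (k : κ) (v : ν) :
    (PySem.Dict.ofList [(k, v)]).items = [(k, v)] := by
  rfl

-- ===== VERDICT (by name: the statement is the Claim_ definition above) =====
theorem get_file_section_spec : Claim_equal_get_file_section := by
  intro lines identifier _
  unfold Spec_get_file_section get_file_section get_file_section_alt
  obtain ⟨i1, i2, i3, i4, i5⟩ := main_inv identifier lines
  rcases i5 with ⟨hnil, hnone⟩ | ⟨ls0, l0, hl2, hsome⟩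
  · simp only [hnil, hnone, if_pos, pvSecs_zero]
    simp only [List.zip_cons_cons, List.zip_nil_left]
    exact items_ofList_singleton _ _
  · have hne : ((PySem.List.enumerate lines 0).foldl (pvStepA identifier) ([], [])).1 ≠ [] := by
      intro h
      rw [hl2] at i1; rw [h] at i1; simp at i1
    simp only [hsome, if_neg hne]
    rw [i4]
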